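-- pv_equiv track=rewrite | github.com/lbdeoliveira/botrista_parser | log_parser.py | action_results
-- ===== SOURCE A (Python) =====
-- def action_results(log_lines, action_inds, outcomes={'stopped', 'completed', 'finished fill'}):
--     '''
--     :param log_lines: processed and relevant lines from log
--     :param action_inds: indices of user actions in log_lines
--     :param outcomes: events considered outcomes (from user actions)
--     :return:
--     '''
--     events = []
--     for i in range(len(action_inds) - 1):
--         ind = action_inds[i]
--         next_ind = action_inds[i + 1]
--         action_line, action_type = log_lines[ind][0], log_lines[ind][2]
--         for j in range(ind + 1, next_ind):
--             line = log_lines[j]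
--             line_num, ts, event = line[0], line[1], line[2]
--             if event in outcomes:
--                 if event == 'stopped':
--                     event += f' - {line[3]}'
--                 events.append((action_type, action_line, event, line_num))
--     return events
-- ===== SOURCE B (Python) =====
-- def action_results(log_lines, action_inds, outcomes={'stopped', 'completed', 'finished fill'}):
--     # Single stateful left-to-right scan from the first to the last action index,
--     # driven by a set of action positions, instead of nested per-pair index loops.
--     # Assumes strictly increasing action_inds (stated in Pre_).
--     if len(action_inds) < 2:
--         return []
--     actions = set(action_inds)
--     events = []
--     action_type = action_line = None
--     for j in range(action_inds[0], action_inds[-1]):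
--         row = log_lines[j]
--         if j in actions:
--             action_type, action_line = row[2], row[0]
--         else:
--             event = row[2]
--             if event in outcomes:
--                 if event == 'stopped':
--                     event += f' - {row[3]}'
--                 events.append((action_type, action_line, event, row[0]))
--     return events
-- ===== Notes on version B (the rewrite author's own statement) =====
-- stated objective: alternative
-- what changed: Replaced A's nested loops over consecutive index pairs by a single stateful left-to-right scan from the first to the last action index, driven by a set of action positions: the scan overwrites a 'current action' state at action indices and emits outcome lines against that state; Pre_ excludes inputs where A raises (IndexError) and non-strictly-increasing action_inds.
import Mathlib
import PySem

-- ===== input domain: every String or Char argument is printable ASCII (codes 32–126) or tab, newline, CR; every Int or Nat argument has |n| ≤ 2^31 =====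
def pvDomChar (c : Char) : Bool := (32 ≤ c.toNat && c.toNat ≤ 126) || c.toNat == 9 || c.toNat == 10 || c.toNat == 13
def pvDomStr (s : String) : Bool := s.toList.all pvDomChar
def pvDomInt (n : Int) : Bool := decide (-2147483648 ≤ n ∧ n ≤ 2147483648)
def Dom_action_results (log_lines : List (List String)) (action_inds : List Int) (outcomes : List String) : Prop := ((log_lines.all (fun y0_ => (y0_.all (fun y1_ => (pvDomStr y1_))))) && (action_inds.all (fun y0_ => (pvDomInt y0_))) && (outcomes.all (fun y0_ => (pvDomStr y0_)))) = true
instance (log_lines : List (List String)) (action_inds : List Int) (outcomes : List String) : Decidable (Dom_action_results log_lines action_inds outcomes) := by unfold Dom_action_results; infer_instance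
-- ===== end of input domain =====

-- B replaces A's nested per-pair index loops by one stateful left-to-right scan between the
-- first and last action index (alternative decomposition, same cost); return values proved equal
-- on strictly increasing action_inds where A does not raise.

-- ===== PORT A =====
def action_results (log_lines : List (List String)) (action_inds : List Int) (outcomes : List String) : List (String × String × String × String) :=
  (List.range (action_inds.length - 1)).foldl (fun events i =>
    let ind := action_inds.getD i 0
    let next_ind := action_inds.getD (i + 1) 0
    let action_line := (PySem.List.pyGetD log_lines ind []).getD 0 ""
    let action_type := (PySem.List.pyGetD log_lines ind []).getD 2 ""
    (PySem.List.pyRange (ind + 1) next_ind 1).foldl (fun events j =>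
      let line := PySem.List.pyGetD log_lines j []
      let line_num := line.getD 0 ""
      let event := line.getD 2 ""
      if outcomes.contains event then
        let event := if event == "stopped" then event ++ " - " ++ line.getD 3 "" else event
        events ++ [(action_type, action_line, event, line_num)]
      else
        events) events) []

-- ===== PORT B =====
-- loop body of B's single scan: state = (events, action_type, action_line)
def bStep (log_lines : List (List String)) (outcomes : List String) (actions : PySem.Set Int)
    (st : List (String × String × String × String) × String × String) (j : Int) :
    List (String × String × String × String) × String × String :=
  let row := PySem.List.pyGetD log_lines j []
  if PySem.Set.contains actions j then
    (st.1, row.getD 2 "", row.getD 0 "")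
  else
    let event := row.getD 2 ""
    if outcomes.contains event then
      let event := if event == "stopped" then event ++ " - " ++ row.getD 3 "" else event
      (st.1 ++ [(st.2.1, st.2.2, event, row.getD 0 "")], st.2.1, st.2.2)
    else st

-- action_inds[0] / action_inds[-1] are headD / getLastD (the list has length ≥ 2 here)
def action_results_alt (log_lines : List (List String)) (action_inds : List Int) (outcomes : List String) : List (String × String × String × String) :=
  if action_inds.length < 2 then []
  else
    let actions := PySem.Set.ofList action_inds
    ((PySem.List.pyRange (action_inds.headD 0) (action_inds.getLastD 0) 1).foldl
      (bStep log_lines outcomes actions) ([], "", "")).1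

-- ===== PRECONDITION & SPEC =====
-- Pre_ excludes (a) exactly the inputs on which Python A raises an IndexError (an action index
-- outside log_lines, an action or scanned line shorter than 3, a 'stopped' outcome line shorter
-- than 4), and (b) action_inds that are not strictly increasing: there A's positional pair ranges
-- (empty or overlapping) and B's left-to-right scan are both defensible readings of 'events
-- between consecutive user actions', and we do not claim either.
def Pre_action_results (log_lines : List (List String)) (action_inds : List Int) (outcomes : List String) : Prop :=
  List.Pairwise (· < ·) action_inds ∧
  ((action_inds.zip action_inds.tail).all (fun p =>
    match PySem.List.pyGet? log_lines p.1 with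
    | none => false
    | some aline =>
      decide (3 ≤ aline.length) &&
      (PySem.List.pyRange (p.1 + 1) p.2 1).all (fun j =>
        match PySem.List.pyGet? log_lines j with
        | none => false
        | some line =>
          decide (3 ≤ line.length) &&
          (!(outcomes.contains (line.getD 2 "") && line.getD 2 "" == "stopped") ||
            decide (4 ≤ line.length))))) = true
instance (log_lines : List (List String)) (action_inds : List Int) (outcomes : List String) : Decidable (Pre_action_results log_lines action_inds outcomes) := by unfold Pre_action_results; infer_instance

def pvWitness_action_results : List (List String) × List Int × List String :=
  ([["1", "t", "started"], ["2", "t", "completed"], ["3", "t", "stopped", "x"], ["4", "t", "started"]],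
   [0, 3], ["stopped", "completed", "finished fill"])

def Spec_action_results (log_lines : List (List String)) (action_inds : List Int) (outcomes : List String) (out : List (String × String × String × String)) : Prop := out = action_results_alt log_lines action_inds outcomes
instance (log_lines : List (List String)) (action_inds : List Int) (outcomes : List String) (out : List (String × String × String × String)) : Decidable (Spec_action_results log_lines action_inds outcomes out) := by unfold Spec_action_results; infer_instance

-- ===== CLAIM (what is proved, stated in full; the proofs are below) =====
def Claim_equal_action_results : Prop := ∀ (log_lines : List (List String)) (action_inds : List Int) (outcomes : List String), Dom_action_results log_lines action_inds outcomes → Pre_action_results log_lines action_inds outcomes → Spec_action_results log_lines action_inds outcomes (action_results log_lines action_inds outcomes)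

-- ===== LEMMAS AND PROOFS =====

-- the per-pair segment both algorithms produce between an action at a and the next at b
def segB (log_lines : List (List String)) (outcomes : List String) (a b : Int) :
    List (String × String × String × String) :=
  ((PySem.List.pyRange (a + 1) b 1).filter
      (fun j => outcomes.contains ((PySem.List.pyGetD log_lines j []).getD 2 ""))).map
    (fun j =>
      let line := PySem.List.pyGetD log_lines j []
      let ev := line.getD 2 ""
      ((PySem.List.pyGetD log_lines a []).getD 2 "",
       (PySem.List.pyGetD log_lines a []).getD 0 "",
       (if ev == "stopped" then ev ++ " - " ++ line.getD 3 "" else ev),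
       line.getD 0 ""))

-- consecutive index pairs read by A's outer loop = zip of the list with its tail
theorem range_map_pairs (inds : List Int) :
    (List.range (inds.length - 1)).map (fun i => (inds.getD i 0, inds.getD (i + 1) 0))
      = inds.zip inds.tail := by
  apply List.ext_getElem
  · simp [List.length_zip]
  · intro i h1 h2
    simp at h1
    simp [List.getElem_zip, List.getElem_tail,
      List.getElem?_eq_getElem (show i < inds.length by omega),
      List.getElem?_eq_getElem (show i + 1 < inds.length by omega)]

-- A's inner loop accumulates exactly the filtered-and-mapped scan range
theorem inner_aux (ll : List (List String)) (outs : List String) (at_ al_ : String)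
    (l : List Int) (acc : List (String × String × String × String)) :
    l.foldl (fun events j =>
      let line := PySem.List.pyGetD ll j []
      let line_num := line.getD 0 ""
      let event := line.getD 2 ""
      if outs.contains event then
        let event := if event == "stopped" then event ++ " - " ++ line.getD 3 "" else event
        events ++ [(at_, al_, event, line_num)]
      else
        events) acc
    = acc ++ (l.filter (fun j => outs.contains ((PySem.List.pyGetD ll j []).getD 2 ""))).map
        (fun j =>
          let line := PySem.List.pyGetD ll j []
          let ev := line.getD 2 ""
          (at_, al_, (if ev == "stopped" then ev ++ " - " ++ line.getD 3 "" else ev), line.getD 0 "")) := by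
  induction l generalizing acc with
  | nil => simp
  | cons j t ih =>
    simp only [List.foldl_cons, List.filter_cons]
    rw [ih]
    by_cases h : (PySem.List.pyGetD ll j [])[2]?.getD "" ∈ outs <;>
      simp [h, List.append_assoc]

-- A's outer loop over index pairs accumulates the flatMap of the per-pair segments
theorem outer_aux (log_lines : List (List String)) (action_inds : List Int) (outcomes : List String)
    (l : List Nat) (acc : List (String × String × String × String)) :
    l.foldl (fun events i =>
      let ind := action_inds.getD i 0
      let next_ind := action_inds.getD (i + 1) 0
      let action_line := (PySem.List.pyGetD log_lines ind []).getD 0 ""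
      let action_type := (PySem.List.pyGetD log_lines ind []).getD 2 ""
      (PySem.List.pyRange (ind + 1) next_ind 1).foldl (fun events j =>
        let line := PySem.List.pyGetD log_lines j []
        let line_num := line.getD 0 ""
        let event := line.getD 2 ""
        if outcomes.contains event then
          let event := if event == "stopped" then event ++ " - " ++ line.getD 3 "" else event
          events ++ [(action_type, action_line, event, line_num)]
        else
          events) events) acc
    = acc ++ (l.map (fun i => (action_inds.getD i 0, action_inds.getD (i + 1) 0))).flatMap
        (fun p => segB log_lines outcomes p.1 p.2) := by
  induction l generalizing acc with
  | nil => simp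
  | cons i t ih =>
    simp only [List.foldl_cons, List.map_cons, List.flatMap_cons]
    rw [ih, inner_aux, List.append_assoc]
    rfl

-- A's value, characterised: the flatMap of per-pair segments over consecutive pairs
theorem a_eq_flatMap (log_lines : List (List String)) (action_inds : List Int) (outcomes : List String) :
    action_results log_lines action_inds outcomes
      = (action_inds.zip action_inds.tail).flatMap (fun p => segB log_lines outcomes p.1 p.2) := by
  unfold action_results
  rw [outer_aux, range_map_pairs, List.nil_append]

-- B's scan over a gap (no action indices inside) emits the segment, state unchanged
theorem gap_scan (ll : List (List String)) (outs : List String) (actions : PySem.Set Int)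
    (l : List Int) (hl : ∀ j ∈ l, j ∉ actions)
    (ev : List (String × String × String × String)) (s : String × String) :
    l.foldl (bStep ll outs actions) (ev, s)
      = (ev ++ (l.filter (fun j => outs.contains ((PySem.List.pyGetD ll j []).getD 2 ""))).map
          (fun j =>
            let line := PySem.List.pyGetD ll j []
            let evn := line.getD 2 ""
            (s.1, s.2, (if evn == "stopped" then evn ++ " - " ++ line.getD 3 "" else evn), line.getD 0 "")), s) := by
  induction l generalizing ev with
  | nil => simp
  | cons j t ih =>
    simp only [List.foldl_cons, List.filter_cons]
    have hj : j ∉ actions := hl j (by simp)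
    by_cases h : (PySem.List.pyGetD ll j [])[2]?.getD "" ∈ outs <;>
      simp [bStep, PySem.Set.contains, hj, h, ih (fun x hx => hl x (by simp [hx])), List.append_assoc]

-- a strict chain is bounded by its last element
theorem chain_le_getLastD (t : List Int) : ∀ (b d : Int), List.Pairwise (· < ·) (b :: t) →
    b ≤ (b :: t).getLastD d := by
  induction t with
  | nil => intro b d _; simp
  | cons c t' ih =>
    intro b d hp
    have hbc : b < c := (List.pairwise_cons.1 hp).1 c (by simp)
    have := ih c d (List.pairwise_cons.1 hp).2
    simp only [List.getLastD_cons] at this ⊢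
    omega

-- B's scan from an action at a through the rest of the chain produces the flatMap of segments
theorem chain_scan (ll : List (List String)) (outs : List String) :
    ∀ (rest : List Int) (a : Int) (pre : List Int)
      (ev : List (String × String × String × String)) (s : String × String),
      List.Pairwise (· < ·) (pre ++ a :: rest) →
      ((PySem.List.pyRange a ((a :: rest).getLastD 0) 1).foldl
          (bStep ll outs (PySem.Set.ofList (pre ++ a :: rest))) (ev, s)).1
        = ev ++ ((a :: rest).zip rest).flatMap (fun p => segB ll outs p.1 p.2) := by
  intro rest
  induction rest with
  | nil =>
    intro a pre ev s _
    simp [PySem.List.pyRange_one_eq_nil (le_refl a)]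
  | cons b t ih =>
    intro a pre ev s hp
    have hab : a < b := by
      have := (List.pairwise_append.1 hp).2.1
      exact (List.pairwise_cons.1 this).1 b (by simp)
    have hchain_bt : List.Pairwise (· < ·) (b :: t) :=
      (List.pairwise_cons.1 (List.pairwise_append.1 hp).2.1).2
    have hblast : b ≤ (b :: t).getLastD 0 := chain_le_getLastD t b 0 hchain_bt
    have hlast : (a :: b :: t).getLastD 0 = (b :: t).getLastD 0 := by
      simp
    rw [hlast,
      PySem.List.pyRange_one_cons (by omega : a < (b :: t).getLastD 0),
      PySem.List.pyRange_one_append (a + 1) b ((b :: t).getLastD 0) (by omega) hblast]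
    simp only [List.foldl_cons, List.foldl_append]
    -- step at j = a: action row, state overwritten
    have ha_mem : a ∈ PySem.Set.ofList (pre ++ a :: b :: t) :=
      (PySem.Set.mem_ofList _ _).2 (by simp)
    have hstep : bStep ll outs (PySem.Set.ofList (pre ++ a :: b :: t)) (ev, s) a
        = (ev, (PySem.List.pyGetD ll a []).getD 2 "", (PySem.List.pyGetD ll a []).getD 0 "") := by
      simp [bStep, PySem.Set.contains, ha_mem]
    rw [hstep]
    -- the gap (a+1 .. b) contains no action index
    have hgap : ∀ j ∈ PySem.List.pyRange (a + 1) b 1,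
        j ∉ PySem.Set.ofList (pre ++ a :: b :: t) := by
      intro j hj hc
      have hjr : a + 1 ≤ j ∧ j < b := (PySem.List.mem_pyRange_one).1 hj
      have hjmem : j ∈ pre ++ a :: b :: t := (PySem.Set.mem_ofList _ _).1 hc
      rcases List.mem_append.1 hjmem with hpre | hsuf
      · -- pre elements are < a
        have := (List.pairwise_append.1 hp).2.2 j hpre a (by simp)
        omega
      · rcases List.mem_cons.1 hsuf with h1 | hsuf1
        · omega
        · rcases List.mem_cons.1 hsuf1 with h2 | h3
          · omega
          · have := (List.pairwise_cons.1 hchain_bt).1 j h3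
            omega
    rw [gap_scan ll outs _ _ hgap]
    -- recurse on the chain starting at b, with pre' = pre ++ [a]
    have hre : pre ++ a :: b :: t = (pre ++ [a]) ++ b :: t := by simp
    have hp' : List.Pairwise (· < ·) ((pre ++ [a]) ++ b :: t) := by rw [← hre]; exact hp
    rw [hre, ih b (pre ++ [a]) _ _ hp']
    simp only [List.zip_cons_cons, List.flatMap_cons, segB, List.append_assoc]

-- the two ports agree on every strictly increasing action_inds
theorem ports_eq (log_lines : List (List String)) (action_inds : List Int) (outcomes : List String)
    (hp : List.Pairwise (· < ·) action_inds) :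
    action_results log_lines action_inds outcomes = action_results_alt log_lines action_inds outcomes := by
  rw [a_eq_flatMap]
  unfold action_results_alt
  by_cases hlen : action_inds.length < 2
  · match action_inds, hlen with
    | [], _ => simp
    | [x], _ => simp
  · simp only [if_neg hlen]
    match action_inds, hlen, hp with
    | [], h, _ => simp at h
    | [x], h, _ => simp at h
    | a :: b :: t, _, hp =>
      have := chain_scan log_lines outcomes (b :: t) a [] [] ("", "") (by simpa using hp)
      simp only [List.nil_append] at this
      simpa using this.symm

-- ===== VERDICT (by name: the statement is the Claim_ definition above) =====
theorem action_results_spec : Claim_equal_action_results := by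
  intro ll inds outs _ hpre
  exact ports_eq ll inds outs hpre.1
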